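-- pv_equiv track=rewrite | github.com/PrestonMichaels/m14 | m14.py | process_contest_results
-- ===== SOURCE A (Python) =====
-- def process_contest_results(lines):
--     max_level = -1
--     winner = ""
--     pakuri_species = set()
--
--     for line in lines:
--         parts = line.strip().split(',')
--         trainer_name = parts[0]
--         pakuri_data = parts[1:]
--
--         for entry in pakuri_data:
--             species, level_str = entry.split('-')
--             level = int(level_str)
--             pakuri_species.add(species)
--
--             if level > max_level:
--                 max_level = level
--                 winner = trainer_name
--
--     sorted_species = sorted(pakuri_species)
--     return winner, sorted_species
-- ===== SOURCE B (Python) =====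
-- def process_contest_results(lines):
--     # Pass 1: flatten the input into a list of (trainer, species, level) entries.
--     entries = []
--     for line in lines:
--         trainer, *tokens = line.strip().split(',')
--         for tok in tokens:
--             species, level_str = tok.split('-')
--             entries.append((trainer, species, int(level_str)))
--     # Reduce: first-seen trainer with the maximal level (default for no entries).
--     winner = max(entries, key=lambda e: e[2], default=("", "", -1))[0]
--     return winner, sorted({e[1] for e in entries})
-- ===== Notes on version B (the rewrite author's own statement) =====
-- stated objective: alternative
-- what changed: A's single fused loop that threads a running max-level/winner and a species set through nested iteration is replaced by a build-then-reduce decomposition: first flatten the lines into one list of parsed (trainer, species, level) entries, then take the winner with max(..., key=level, default) (first-seen wins ties, as in A's strict '>' update) and the species as sorted over a set comprehension.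
import Mathlib
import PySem

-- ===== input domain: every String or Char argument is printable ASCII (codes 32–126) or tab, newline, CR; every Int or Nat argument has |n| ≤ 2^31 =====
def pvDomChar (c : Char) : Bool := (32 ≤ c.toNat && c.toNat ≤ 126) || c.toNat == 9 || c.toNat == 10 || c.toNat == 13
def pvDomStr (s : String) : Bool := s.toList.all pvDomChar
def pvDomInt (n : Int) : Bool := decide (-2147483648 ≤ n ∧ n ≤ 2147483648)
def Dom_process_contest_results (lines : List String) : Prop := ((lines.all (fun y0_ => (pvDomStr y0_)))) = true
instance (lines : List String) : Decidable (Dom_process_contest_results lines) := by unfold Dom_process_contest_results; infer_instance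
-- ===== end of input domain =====

-- B replaces A's fused winner/species loop by a build-then-reduce decomposition:
-- flatten the lines into one entry list, then take max-by-level and a sorted set (objective: alternative).

-- ===== PORT A =====
-- A's inner 'for entry in pakuri_data' loop; none = ValueError (bad split('-') unpack or int()).
def pvAEntries (trainer : String) (toks : List String)
    (st : Int × String × PySem.Set String) : Option (Int × String × PySem.Set String) :=
  match toks with
  | [] => some st
  | tok :: rest =>
    match PySem.Str.split? tok "-" with
    | some [species, levelStr] =>
      match PySem.Int.ofStr? levelStr with
      | some level =>
        let sp := PySem.Set.add st.2.2 species
        pvAEntries trainer rest (if level > st.1 then (level, trainer, sp) else (st.1, st.2.1, sp))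
      | none => none            -- int(level_str) raises ValueError
    | _ => none                 -- 'species, level_str = entry.split('-')' raises ValueError

-- A's outer 'for line in lines' loop (the '| _ => none' arm is unreachable: split(',') is never empty).
def pvALines (lines : List String) (st : Int × String × PySem.Set String) :
    Option (Int × String × PySem.Set String) :=
  match lines with
  | [] => some st
  | line :: rest =>
    match PySem.Str.split? (PySem.Str.strip line) "," with
    | some (trainer :: data) =>
      match pvAEntries trainer data st with
      | some st' => pvALines rest st'
      | none => none
    | _ => none

def process_contest_results (lines : List String) : String × List String :=
  match pvALines lines (-1, "", PySem.Set.empty) with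
  | some (_, winner, sp) => (winner, PySem.List.sorted sp (fun x => x))
  | none => ("", [])            -- Python raises here; excluded by Pre_

-- ===== PORT B =====
-- Source B: parse one token into (trainer, species, level); none = ValueError.
def pvBTok (trainer tok : String) : Option (String × String × Int) :=
  match PySem.Str.split? tok "-" with
  | some [species, levelStr] => (PySem.Int.ofStr? levelStr).map (fun lvl => (trainer, species, lvl))
  | _ => none

-- Source B pass 1: the flat 'entries' list ('| _ => none' unreachable: split(',') is never empty).
def pvBEntries (lines : List String) : Option (List (String × String × Int)) :=
  match lines with
  | [] => some []
  | line :: rest =>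
    match PySem.Str.split? (PySem.Str.strip line) "," with
    | some (trainer :: toks) =>
      match toks.mapM (pvBTok trainer), pvBEntries rest with
      | some es, some rest' => some (es ++ rest')
      | _, _ => none
    | _ => none

-- Source B reduce: max(entries, key=level, default) (= PySem.List.maxD) and sorted set of species.
def process_contest_results_alt (lines : List String) : String × List String :=
  match pvBEntries lines with
  | some entries =>
    ((PySem.List.maxD entries (fun e => e.2.2) ("", "", -1)).1,
     PySem.List.sorted (PySem.Set.ofList (entries.map (fun e => e.2.1))) (fun x => x))
  | none => ("", [])            -- Python raises here; excluded by Pre_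

-- ===== PRECONDITION & SPEC =====
-- Pre_ excludes exactly the inputs where A raises ValueError: an entry token that does not split
-- on '-' into exactly two pieces, or whose level piece is not an int literal.
def pvTokOK (tok : String) : Bool :=
  match PySem.Str.split? tok "-" with
  | some [_, levelStr] => (PySem.Int.ofStr? levelStr).isSome
  | _ => false

def pvLineOK (line : String) : Bool :=
  match PySem.Str.split? (PySem.Str.strip line) "," with
  | some (_ :: toks) => toks.all pvTokOK
  | _ => false

def Pre_process_contest_results (lines : List String) : Prop :=
  (lines.all pvLineOK) = true
instance (lines : List String) : Decidable (Pre_process_contest_results lines) := by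
  unfold Pre_process_contest_results; infer_instance

def pvWitness_process_contest_results : List String :=
  ["ash,pika-5,bulb-3", "misty,star-7", "brock"]

def Spec_process_contest_results (lines : List String) (out : String × List String) : Prop :=
  out = process_contest_results_alt lines
instance (lines : List String) (out : String × List String) :
    Decidable (Spec_process_contest_results lines out) := by
  unfold Spec_process_contest_results; infer_instance

-- ===== CLAIM (what is proved, stated in full; the proofs are below) =====
def Claim_equal_process_contest_results : Prop :=
  ∀ (lines : List String), Dom_process_contest_results lines →
    Pre_process_contest_results lines →
    Spec_process_contest_results lines (process_contest_results lines)

-- ===== LEMMAS AND PROOFS =====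

-- A piece produced by splitting on '-' contains no '-' (invariant of PySem.Chars.splitOn.go).
lemma pvGoNoDash : ∀ (fuel : Nat) (l cur : List Char) (acc : List (List Char)),
    l.length < fuel → '-' ∉ cur → (∀ p ∈ acc, '-' ∉ p) →
    ∀ p ∈ PySem.Chars.splitOn.go ['-'] fuel l cur acc, '-' ∉ p := by
  intro fuel
  induction fuel with
  | zero => intro l cur acc h; omega
  | succ n ih =>
    intro l cur acc hlen hcur hacc p hp
    match l with
    | [] =>
      rw [show PySem.Chars.splitOn.go ['-'] (n+1) [] cur acc = (cur.reverse :: acc).reverse from rfl] at hp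
      simp at hp
      rcases hp with h | h
      · exact hacc p h
      · subst h; simpa using hcur
    | c :: rest =>
      rw [show PySem.Chars.splitOn.go ['-'] (n+1) (c :: rest) cur acc
            = if (['-'] : List Char).isPrefixOf (c :: rest) then
                PySem.Chars.splitOn.go ['-'] n (List.drop 1 (c :: rest)) [] (cur.reverse :: acc)
              else PySem.Chars.splitOn.go ['-'] n rest (c :: cur) acc from rfl] at hp
      by_cases hpre : (['-'] : List Char).isPrefixOf (c :: rest)
      · rw [if_pos hpre] at hp
        refine ih _ _ _ (by simp at hlen ⊢; omega) (by simp) ?_ p hp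
        intro q hq
        rcases List.mem_cons.mp hq with h | h
        · subst h; simpa using hcur
        · exact hacc q h
      · rw [if_neg hpre] at hp
        have hc : c ≠ '-' := by
          intro h; subst h; exact hpre (by simp [List.isPrefixOf])
        refine ih _ _ _ (by simp at hlen ⊢; omega) ?_ hacc p hp
        intro h
        rcases List.mem_cons.mp h with h | h
        · exact hc h.symm
        · exact hcur h

-- int(s) on a string without '-' never returns a negative value.
lemma pvOfStrNonneg (s : String) (hnd : '-' ∉ s.toList) (n : Int)
    (h : PySem.Int.ofStr? s = some n) : 0 ≤ n := by
  rw [show PySem.Int.ofStr? s = PySem.Int.ofChars? s.toList from rfl] at h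
  unfold PySem.Int.ofChars? at h
  simp only [] at h
  have hsub : ∀ c ∈ (List.dropWhile PySem.Int.isIntSpace
      (List.dropWhile PySem.Int.isIntSpace s.toList).reverse).reverse, c ∈ s.toList := by
    intro c hc
    exact (List.dropWhile_sublist (p := PySem.Int.isIntSpace) (l := s.toList)).subset
      (List.mem_reverse.mp ((List.dropWhile_sublist (p := PySem.Int.isIntSpace)
        (l := (List.dropWhile PySem.Int.isIntSpace s.toList).reverse)).subset
        (List.mem_reverse.mp hc)))
  generalize hcs : (List.dropWhile PySem.Int.isIntSpace
      (List.dropWhile PySem.Int.isIntSpace s.toList).reverse).reverse = cs at h hsub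
  clear hcs
  split at h
  · exact absurd (hsub '-' (by simp)) hnd
  · simp only [Option.map_eq_some_iff] at h
    obtain ⟨a, ha1, ha2⟩ := h
    subst ha2
    simp only [bind, Option.bind_eq_some_iff, Option.pure_def, Option.some.injEq] at ha1
    obtain ⟨b, _, hb⟩ := ha1
    subst hb
    exact Int.natCast_nonneg b
  · simp only [Option.map_eq_some_iff] at h
    obtain ⟨a, ha1, ha2⟩ := h
    subst ha2
    simp only [bind, Option.bind_eq_some_iff, Option.pure_def, Option.some.injEq] at ha1
    obtain ⟨b, _, hb⟩ := ha1
    subst hb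
    exact Int.natCast_nonneg b

-- Hence a level parsed from the second piece of tok.split('-') is nonnegative.
lemma pvLevelNonneg (tok species levelStr : String) (lvl : Int)
    (hs : PySem.Str.split? tok "-" = some [species, levelStr])
    (ho : PySem.Int.ofStr? levelStr = some lvl) : 0 ≤ lvl := by
  simp only [PySem.Str.split?, PySem.Chars.split?] at hs
  have hsep : ("-" : String).toList = ['-'] := rfl
  rw [hsep] at hs
  simp only [List.isEmpty_cons, Option.map_some, Option.some.injEq] at hs
  have hmem : levelStr.toList ∈ PySem.Chars.splitOn tok.toList ['-'] := by
    rcases hps : PySem.Chars.splitOn tok.toList ['-'] with _ | ⟨a, _ | ⟨b, _ | ⟨x, xs⟩⟩⟩ <;>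
      rw [hps] at hs <;> simp at hs
    · obtain ⟨_, hb⟩ := hs
      rw [← hb]
      simp
  have hnd : '-' ∉ levelStr.toList := by
    have := pvGoNoDash (tok.toList.length + 1) tok.toList [] []
      (by omega) (by simp) (by simp)
    exact this _ (by rw [PySem.Chars.splitOn] at hmem; exact hmem)
  exact pvOfStrNonneg levelStr hnd lvl ho

-- A's fused per-entry state update, replayed over an already-parsed entry list.
def pvRun (es : List (String × String × Int)) (st : Int × String × PySem.Set String) :
    Int × String × PySem.Set String :=
  match es with
  | [] => st
  | e :: t => pvRun t (if e.2.2 > st.1 then (e.2.2, e.1, PySem.Set.add st.2.2 e.2.1)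
                       else (st.1, st.2.1, PySem.Set.add st.2.2 e.2.1))

def pvWStep (p : Int × String) (e : String × String × Int) : Int × String :=
  if e.2.2 > p.1 then (e.2.2, e.1) else p

lemma pvL1 (trainer : String) (toks : List String) :
    ∀ (st : Int × String × PySem.Set String) (es : List (String × String × Int)),
      toks.mapM (pvBTok trainer) = some es →
      pvAEntries trainer toks st = some (pvRun es st) := by
  induction toks with
  | nil =>
    intro st es h
    simp only [List.mapM_nil, Option.pure_def, Option.some.injEq] at h
    subst h
    simp [pvAEntries, pvRun]
  | cons tok rest ih =>
    intro st es h
    rw [List.mapM_cons] at h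
    cases htok : pvBTok trainer tok with
    | none => simp [htok] at h
    | some p =>
      cases hrest : rest.mapM (pvBTok trainer) with
      | none => simp [htok, hrest] at h
      | some es' =>
        simp only [htok, hrest] at h
        simp at h
        subst h
        unfold pvBTok at htok
        cases hs : PySem.Str.split? tok "-" with
        | none => simp [hs] at htok
        | some parts =>
          rcases parts with _ | ⟨s, _ | ⟨l, _ | ⟨x, xs⟩⟩⟩
          · simp [hs] at htok
          · simp [hs] at htok
          · cases ho : PySem.Int.ofStr? l with
            | none => simp [hs, ho] at htok
            | some lvl =>
              simp only [hs, ho, Option.map_some, Option.some.injEq] at htok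
              subst htok
              simp only [pvAEntries, hs, ho]
              rw [ih _ es' hrest]
              by_cases hc : lvl > st.1 <;> simp [pvRun, hc]
          · simp [hs] at htok

lemma pvL2 (es fs : List (String × String × Int)) (st : Int × String × PySem.Set String) :
    pvRun (es ++ fs) st = pvRun fs (pvRun es st) := by
  induction es generalizing st with
  | nil => simp [pvRun]
  | cons e t ih => simp [pvRun, ih]

lemma pvBE_eq (line : String) (rest : List String) (trainer : String) (toks : List String)
    (hs : PySem.Str.split? (PySem.Str.strip line) "," = some (trainer :: toks)) :
    pvBEntries (line :: rest)
      = match toks.mapM (pvBTok trainer), pvBEntries rest with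
        | some es, some rest' => some (es ++ rest')
        | _, _ => none := by
  simp only [pvBEntries, hs]

lemma pvL3 (lines : List String) :
    ∀ (st : Int × String × PySem.Set String) (entries : List (String × String × Int)),
      pvBEntries lines = some entries →
      pvALines lines st = some (pvRun entries st) := by
  induction lines with
  | nil =>
    intro st entries h
    simp only [pvBEntries, Option.some.injEq] at h
    subst h
    simp [pvALines, pvRun]
  | cons line rest ih =>
    intro st entries h
    cases hs : PySem.Str.split? (PySem.Str.strip line) "," with
    | none => unfold pvBEntries at h; rw [hs] at h; simp at h
    | some parts =>
      cases parts with
      | nil => unfold pvBEntries at h; rw [hs] at h; simp at h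
      | cons trainer toks =>
        rw [pvBE_eq line rest trainer toks hs] at h
        cases hm : toks.mapM (pvBTok trainer) with
        | none => rw [hm] at h; simp at h
        | some es =>
          cases hr : pvBEntries rest with
          | none => rw [hm, hr] at h; simp at h
          | some rest' =>
            rw [hm, hr] at h
            simp at h
            subst h
            simp only [pvALines, hs, pvL1 trainer toks st es hm]
            rw [ih (pvRun es st) rest' hr, pvL2]

lemma pvL4 (es : List (String × String × Int)) :
    ∀ (st : Int × String × PySem.Set String),
      pvRun es st = ((es.foldl pvWStep (st.1, st.2.1)).1,
                     (es.foldl pvWStep (st.1, st.2.1)).2,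
                     es.foldl (fun s e => PySem.Set.add s e.2.1) st.2.2) := by
  induction es with
  | nil => intro st; simp [pvRun]
  | cons e t ih =>
    intro st
    by_cases hc : e.2.2 > st.1 <;>
      simp [pvRun, List.foldl_cons, pvWStep, hc, ih]

lemma pvL5 (t : List (String × String × Int)) :
    ∀ (b : String × String × Int),
      t.foldl pvWStep (b.2.2, b.1)
        = ((t.foldl (fun m x => if m.2.2 < x.2.2 then x else m) b).2.2,
           (t.foldl (fun m x => if m.2.2 < x.2.2 then x else m) b).1) := by
  induction t with
  | nil => intro b; simp
  | cons x t ih =>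
    intro b
    by_cases hc : b.2.2 < x.2.2 <;>
      simp [List.foldl_cons, pvWStep, hc, ih]

lemma pvL6 (t : List (String × String × Int)) :
    ∀ (e : String × String × Int),
      PySem.List.max? (e :: t) (fun x => x.2.2)
        = some (t.foldl (fun m x => if m.2.2 < x.2.2 then x else m) e) := by
  have aux : ∀ (g : Option (String × String × Int) → (String × String × Int) → Option (String × String × Int)),
      (∀ m x, g (some m) x = if m.2.2 < x.2.2 then some x else some m) →
      ∀ (t : List (String × String × Int)) (e : String × String × Int),
        List.foldl g (some e) t
          = some (t.foldl (fun m x => if m.2.2 < x.2.2 then x else m) e) := by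
    intro g hg t
    induction t with
    | nil => intro e; simp
    | cons x t ih =>
      intro e
      rw [List.foldl_cons, List.foldl_cons, hg]
      by_cases hc : e.2.2 < x.2.2 <;> simp [hc, ih]
  intro e
  simp only [PySem.List.max?, List.foldl_cons]
  refine aux _ (fun m x => rfl) t e

lemma pvL7 (entries : List (String × String × Int))
    (h : ∀ e ∈ entries, 0 ≤ e.2.2) :
    entries.foldl pvWStep (-1, "")
      = ((PySem.List.maxD entries (fun e => e.2.2) ("", "", -1)).2.2,
         (PySem.List.maxD entries (fun e => e.2.2) ("", "", -1)).1) := by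
  cases entries with
  | nil => simp [PySem.List.maxD, PySem.List.max?]
  | cons e t =>
    have he : (0:Int) ≤ e.2.2 := h e (by simp)
    have hgt : e.2.2 > (-1:Int) := by omega
    rw [List.foldl_cons]
    have hstep : pvWStep (-1, "") e = (e.2.2, e.1) := by simp [pvWStep, hgt]
    rw [hstep, pvL5 t e]
    simp [PySem.List.maxD, pvL6 t e]

lemma pvSetEq (es : List (String × String × Int)) :
    es.foldl (fun s e => PySem.Set.add s e.2.1) ([] : PySem.Set String)
      = PySem.Set.ofList (es.map (fun e => e.2.1)) := by
  rw [PySem.Set.ofList_eq_foldl, List.foldl_map]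

lemma pvL8 (lines : List String) (hpre : Pre_process_contest_results lines) :
    ∃ entries, pvBEntries lines = some entries ∧ ∀ e ∈ entries, (0:Int) ≤ e.2.2 := by
  have aux : ∀ (trainer : String) (toks : List String),
      toks.all pvTokOK = true →
      ∃ es, toks.mapM (pvBTok trainer) = some es ∧ ∀ e ∈ es, (0:Int) ≤ e.2.2 := by
    intro trainer toks
    induction toks with
    | nil => intro _; exact ⟨[], by simp, by simp⟩
    | cons tok rest ih =>
      intro h
      simp only [List.all_cons, Bool.and_eq_true] at h
      obtain ⟨es, hes, hnn⟩ := ih h.2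
      have h1 := h.1
      unfold pvTokOK at h1
      cases hs : PySem.Str.split? tok "-" with
      | none => rw [hs] at h1; simp at h1
      | some parts =>
        rw [hs] at h1
        rcases parts with _ | ⟨s, _ | ⟨l, _ | ⟨x, xs⟩⟩⟩
        · simp at h1
        · simp at h1
        · cases ho : PySem.Int.ofStr? l with
          | none => simp [ho] at h1
          | some lvl =>
            refine ⟨(trainer, s, lvl) :: es, ?_, ?_⟩
            · rw [List.mapM_cons]
              simp [pvBTok, hs, ho, hes]
            · intro e he
              rcases List.mem_cons.mp he with h2 | h2
              · subst h2; exact pvLevelNonneg tok s l lvl hs ho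
              · exact hnn e h2
        · simp at h1
  revert hpre
  induction lines with
  | nil => intro _; exact ⟨[], rfl, by simp⟩
  | cons line rest ih =>
    intro hpre
    unfold Pre_process_contest_results at hpre
    simp only [List.all_cons, Bool.and_eq_true] at hpre
    obtain ⟨entries, hB, hnn⟩ := ih hpre.2
    have h1 := hpre.1
    unfold pvLineOK at h1
    cases hs : PySem.Str.split? (PySem.Str.strip line) "," with
    | none => rw [hs] at h1; simp at h1
    | some parts =>
      rw [hs] at h1
      cases parts with
      | nil => simp at h1
      | cons trainer toks =>
        simp only [] at h1
        obtain ⟨es, hes, hnn2⟩ := aux trainer toks h1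
        refine ⟨es ++ entries, ?_, ?_⟩
        · simp only [pvBEntries, hs, hes, hB]
        · intro e he
          rcases List.mem_append.mp he with h2 | h2
          · exact hnn2 e h2
          · exact hnn e h2

-- ===== VERDICT (by name: the statement is the Claim_ definition above) =====
theorem process_contest_results_spec : Claim_equal_process_contest_results := by
  intro lines _ hpre
  obtain ⟨entries, hB, hnn⟩ := pvL8 lines hpre
  unfold Spec_process_contest_results process_contest_results process_contest_results_alt
  rw [pvL3 lines (-1, "", PySem.Set.empty) entries hB, hB]
  simp [pvL4, pvSetEq, pvL7 entries hnn, PySem.Set.empty]
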